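-- pv_equiv track=rewrite | github.com/SMT-COMP/smt-comp | tools/prep/make_participants_md.py | get_new_division_str
-- ===== SOURCE A (Python) =====
-- def get_new_division_str(logics_by_divisions_indexed_by_tracks):
--     divisions = {}
--     logics = {}
--     for track in logics_by_divisions_indexed_by_tracks:
--         for d in logics_by_divisions_indexed_by_tracks[track]:
--             if d not in divisions:
--                 divisions[d] = []
--                 logics[d] = set()
--             divisions[d].append(track)
--             logics[d].update(logics_by_divisions_indexed_by_tracks[track][d])
--
--     division_fields = []
--     for d in sorted(divisions):
--         sub_division_fields = "- name: {}\n  logics:\n{}\n  tracks:\n{}".format(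
--             d,
--             "\n".join(map(lambda x: f"  - {x}", sorted(logics[d]))),
--             "\n".join(map(lambda x: f"  - {x}", divisions[d])))
--         division_fields.append(sub_division_fields)
--     division_fields_str = "\n".join(division_fields)
--     return division_fields_str
-- ===== SOURCE B (Python) =====
-- def get_new_division_str(logics_by_divisions_indexed_by_tracks):
--     items = logics_by_divisions_indexed_by_tracks
--     names = sorted({d for track in items for d in items[track]})
--     blocks = []
--     for d in names:
--         tracks = []
--         logics = set()
--         for t, inner in items.items():
--             if d in inner:
--                 tracks.append(t)
--                 logics.update(inner[d])
--         blocks.append("- name: {}\n  logics:\n{}\n  tracks:\n{}".format(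
--             d,
--             "\n".join("  - " + l for l in sorted(logics)),
--             "\n".join("  - " + t for t in tracks)))
--     return "\n".join(blocks)
-- ===== Notes on version B (the rewrite author's own statement) =====
-- stated objective: alternative
-- what changed: B drops A's single-pass accumulation into two indexing dicts: it first collects the sorted set of division names, then for each division makes one scan over the tracks dict collecting that division's tracks and the union of its logic sets, formatting as A does.
import Mathlib
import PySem

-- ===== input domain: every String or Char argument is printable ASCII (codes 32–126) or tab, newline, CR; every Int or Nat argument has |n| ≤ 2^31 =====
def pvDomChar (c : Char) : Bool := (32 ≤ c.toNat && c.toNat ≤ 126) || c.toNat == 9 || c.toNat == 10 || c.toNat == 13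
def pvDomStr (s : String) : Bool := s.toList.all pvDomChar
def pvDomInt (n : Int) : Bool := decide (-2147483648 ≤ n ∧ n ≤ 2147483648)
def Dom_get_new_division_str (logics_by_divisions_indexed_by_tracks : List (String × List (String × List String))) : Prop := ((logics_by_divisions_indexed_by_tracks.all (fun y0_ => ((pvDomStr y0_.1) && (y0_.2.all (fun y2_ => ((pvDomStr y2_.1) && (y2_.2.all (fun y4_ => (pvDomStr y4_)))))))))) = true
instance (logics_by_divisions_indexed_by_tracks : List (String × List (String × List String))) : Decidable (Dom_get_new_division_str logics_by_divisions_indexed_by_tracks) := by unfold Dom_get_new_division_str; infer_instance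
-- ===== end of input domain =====

-- B replaces A's one-pass accumulation into two indexing dicts by an index-free two-phase scheme
-- (collect the division-name set, then per division rescan the tracks for its track list and logic set);
-- objective: alternative decomposition, same output. Equivalence is about the return value only.

-- ===== PORT A =====
-- state of A's first loop: (divisions, logics)
def pvDD : Type := PySem.Dict String (List String) × PySem.Dict String (PySem.Set String)

-- body of A's inner loop 'for d in ...[track]'
def pvStepA (t : String) (p : pvDD) (dl : String × List String) : pvDD :=
  let p := if p.1.contains dl.1 then p
           else (p.1.insert dl.1 [], p.2.insert dl.1 PySem.Set.empty)
  (p.1.insert dl.1 (p.1.getD dl.1 [] ++ [t]),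
   p.2.insert dl.1 (PySem.Set.update (p.2.getD dl.1 PySem.Set.empty) dl.2))

-- body of A's outer loop 'for track in ...'
def pvTrackA (p : pvDD) (tr : String × List (String × List String)) : pvDD :=
  tr.2.foldl (pvStepA tr.1) p

def get_new_division_str (logics_by_divisions_indexed_by_tracks : List (String × List (String × List String))) : String :=
  let p := logics_by_divisions_indexed_by_tracks.foldl pvTrackA
             ((PySem.Dict.empty : PySem.Dict String (List String)),
              (PySem.Dict.empty : PySem.Dict String (PySem.Set String)))
  let division_fields := (PySem.List.sorted p.1.keys (fun x => x) false).map (fun d =>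
    "- name: " ++ d ++ "\n  logics:\n" ++
    PySem.Str.join "\n" ((PySem.List.sorted (p.2.getD d PySem.Set.empty) (fun x => x) false).map (fun x => "  - " ++ x)) ++
    "\n  tracks:\n" ++
    PySem.Str.join "\n" ((p.1.getD d []).map (fun x => "  - " ++ x)))
  PySem.Str.join "\n" division_fields

-- ===== PORT B =====
-- body of B's per-division scan over the tracks: collect tracks containing d, union their logics
def pvScanB (d : String) (acc : List String × PySem.Set String)
    (tr : String × List (String × List String)) : List String × PySem.Set String :=
  if (tr.2.map Prod.fst).contains d then
    (acc.1 ++ [tr.1], PySem.Set.update acc.2 ((tr.2.lookup d).getD []))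
  else acc

def get_new_division_str_alt (logics_by_divisions_indexed_by_tracks : List (String × List (String × List String))) : String :=
  let items := logics_by_divisions_indexed_by_tracks
  let names := PySem.List.sorted (PySem.Set.ofList (items.flatMap (fun tr => tr.2.map Prod.fst))) (fun x => x) false
  let blocks := names.map (fun d =>
    let r := items.foldl (pvScanB d) ([], PySem.Set.empty)
    "- name: " ++ d ++ "\n  logics:\n" ++
    PySem.Str.join "\n" ((PySem.List.sorted r.2 (fun x => x) false).map (fun x => "  - " ++ x)) ++
    "\n  tracks:\n" ++
    PySem.Str.join "\n" (r.1.map (fun x => "  - " ++ x)))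
  PySem.Str.join "\n" blocks

-- ===== PRECONDITION & SPEC =====
-- Pre_ excludes association lists with duplicate keys (at either level): such lists do not
-- represent a Python dict input faithfully (Python collapses duplicate keys before A runs),
-- so the corner is an artefact of the list encoding, not of A.
def Pre_get_new_division_str (logics_by_divisions_indexed_by_tracks : List (String × List (String × List String))) : Prop :=
  (logics_by_divisions_indexed_by_tracks.map Prod.fst).Nodup ∧
  ∀ tr ∈ logics_by_divisions_indexed_by_tracks, (tr.2.map Prod.fst).Nodup
instance (logics_by_divisions_indexed_by_tracks : List (String × List (String × List String))) : Decidable (Pre_get_new_division_str logics_by_divisions_indexed_by_tracks) := by unfold Pre_get_new_division_str; infer_instance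

def pvWitness_get_new_division_str : (List (String × List (String × List String))) :=
  [("single query", [("QF_LIA", ["LIA", "QF_LIA"])]), ("cloud", [])]

def Spec_get_new_division_str (logics_by_divisions_indexed_by_tracks : List (String × List (String × List String))) (out : String) : Prop := out = get_new_division_str_alt logics_by_divisions_indexed_by_tracks
instance (logics_by_divisions_indexed_by_tracks : List (String × List (String × List String))) (out : String) : Decidable (Spec_get_new_division_str logics_by_divisions_indexed_by_tracks out) := by unfold Spec_get_new_division_str; infer_instance

-- ===== CLAIM (what is proved, stated in full; the proofs are below) =====
def Claim_equal_get_new_division_str : Prop := ∀ (logics_by_divisions_indexed_by_tracks : List (String × List (String × List String))), Dom_get_new_division_str logics_by_divisions_indexed_by_tracks → Pre_get_new_division_str logics_by_divisions_indexed_by_tracks → Spec_get_new_division_str logics_by_divisions_indexed_by_tracks (get_new_division_str logics_by_divisions_indexed_by_tracks)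

-- ===== LEMMAS AND PROOFS =====

-- the two dicts of A's loop always hold the same keys
def pvSync (p : pvDD) : Prop := ∀ x, p.1.contains x = p.2.contains x

theorem pvStepA_spec (t : String) (p : pvDD) (dl : String × List String) (hs : pvSync p) :
    pvSync (pvStepA t p dl)
    ∧ (pvStepA t p dl).1.keys = PySem.Set.add p.1.keys dl.1
    ∧ (∀ x, (pvStepA t p dl).1.getD x [] =
        if x = dl.1 then p.1.getD dl.1 [] ++ [t] else p.1.getD x [])
    ∧ (∀ x, (pvStepA t p dl).2.getD x PySem.Set.empty =
        if x = dl.1 then PySem.Set.update (p.2.getD dl.1 PySem.Set.empty) dl.2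
        else p.2.getD x PySem.Set.empty) := by
  unfold pvStepA pvSync
  by_cases h : p.1.contains dl.1
  · simp only [h, if_true]
    refine ⟨fun x => ?_, ?_, fun x => ?_, fun x => ?_⟩
    · simp [PySem.Dict.contains_insert, hs x]
    · rw [PySem.Dict.keys_insert_of_contains p.1 _ h]
      have hm : dl.1 ∈ p.1.keys := (PySem.Dict.contains_iff_mem_keys _ _).1 h
      simp [PySem.Set.add, PySem.Set.contains, hm]
    · simp [PySem.Dict.getD_insert]
    · simp [PySem.Dict.getD_insert]
  · simp only [h, if_false, Bool.false_eq_true]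
    have h2 : p.2.contains dl.1 = false := by rw [← hs dl.1]; simpa using h
    refine ⟨fun x => ?_, ?_, fun x => ?_, fun x => ?_⟩
    · simp [PySem.Dict.contains_insert, hs x]
    · rw [PySem.Dict.insert_insert_self]
      rw [PySem.Dict.keys_insert_of_not_contains p.1 _ (by simpa using h)]
      have hm : dl.1 ∉ p.1.keys := fun hm => by
        simp [(PySem.Dict.contains_iff_mem_keys p.1 dl.1).2 hm] at h
      simp [PySem.Set.add, PySem.Set.contains, hm]
    · rw [PySem.Dict.insert_insert_self]
      simp [PySem.Dict.getD_insert, PySem.Dict.getD_insert]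
      split_ifs with he
      · subst he; simp [PySem.Dict.getD_of_not_contains p.1 _ (by simpa using h)]
      · rfl
    · rw [PySem.Dict.insert_insert_self]
      simp [PySem.Dict.getD_insert]
      split_ifs with he
      · subst he; simp [PySem.Dict.getD_of_not_contains p.2 _ h2]
      · rfl

theorem pvFoldA_spec (l : List (String × List String)) (t : String) (p : pvDD) (hs : pvSync p) :
    pvSync (l.foldl (pvStepA t) p)
    ∧ (l.foldl (pvStepA t) p).1.keys = PySem.Set.update p.1.keys (l.map Prod.fst)
    ∧ (∀ x, (l.foldl (pvStepA t) p).1.getD x [] =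
        p.1.getD x [] ++ (l.filter (fun dl => decide (dl.1 = x))).map (fun _ => t))
    ∧ (∀ x, (l.foldl (pvStepA t) p).2.getD x PySem.Set.empty =
        PySem.Set.update (p.2.getD x PySem.Set.empty)
          ((l.filter (fun dl => decide (dl.1 = x))).flatMap Prod.snd)) := by
  induction l generalizing p with
  | nil =>
    refine ⟨hs, by simp [PySem.Set.update], fun x => by simp, fun x => by simp [PySem.Set.update]⟩
  | cons hd tl ih =>
    obtain ⟨s1, s2, s3, s4⟩ := pvStepA_spec t p hd hs
    obtain ⟨i1, i2, i3, i4⟩ := ih (pvStepA t p hd) s1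
    refine ⟨i1, ?_, fun x => ?_, fun x => ?_⟩
    · simp only [List.foldl_cons, List.map_cons, PySem.Set.update_cons, i2, s2]
    · simp only [List.foldl_cons, i3 x, s3 x, List.filter_cons]
      by_cases he : hd.1 = x
      · subst he; simp
      · simp [he, Ne.symm he]
    · simp only [List.foldl_cons, i4 x, s4 x, List.filter_cons]
      by_cases he : hd.1 = x
      · subst he; simp [PySem.Set.update_append]
      · simp [he, Ne.symm he]

theorem pvOuterA_spec (lb : List (String × List (String × List String))) (p : pvDD) (hs : pvSync p) :
    pvSync (lb.foldl pvTrackA p)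
    ∧ (lb.foldl pvTrackA p).1.keys =
        PySem.Set.update p.1.keys (lb.flatMap (fun tr => tr.2.map Prod.fst))
    ∧ (∀ x, (lb.foldl pvTrackA p).1.getD x [] =
        p.1.getD x [] ++ lb.flatMap
          (fun tr => ((tr.2.filter (fun dl => decide (dl.1 = x))).map (fun _ => tr.1))))
    ∧ (∀ x, (lb.foldl pvTrackA p).2.getD x PySem.Set.empty =
        PySem.Set.update (p.2.getD x PySem.Set.empty)
          (lb.flatMap (fun tr => (tr.2.filter (fun dl => decide (dl.1 = x))).flatMap Prod.snd))) := by
  induction lb generalizing p with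
  | nil =>
    refine ⟨hs, by simp [PySem.Set.update], fun x => by simp, fun x => by simp [PySem.Set.update]⟩
  | cons hd tl ih =>
    obtain ⟨s1, s2, s3, s4⟩ := pvFoldA_spec hd.2 hd.1 p hs
    obtain ⟨i1, i2, i3, i4⟩ := ih (pvTrackA p hd) s1
    simp only [pvTrackA] at i2 i3 i4
    refine ⟨i1, ?_, fun x => ?_, fun x => ?_⟩
    · simp only [List.foldl_cons, List.flatMap_cons, PySem.Set.update_append, pvTrackA]
      rw [i2, s2]
    · simp only [List.foldl_cons, List.flatMap_cons, pvTrackA]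
      rw [i3 x, s3 x, List.append_assoc]
    · simp only [List.foldl_cons, List.flatMap_cons, PySem.Set.update_append, pvTrackA]
      rw [i4 x, s4 x]

theorem pvFilter_lookup (l : List (String × List String)) (x : String)
    (h : (l.map Prod.fst).Nodup) :
    l.filter (fun dl => decide (dl.1 = x)) =
      (match l.lookup x with | some v => [(x, v)] | none => []) := by
  induction l with
  | nil => rfl
  | cons hd tl ih =>
    obtain ⟨k, v⟩ := hd
    simp only [List.map_cons, List.nodup_cons] at h
    by_cases he : k = x
    · subst he
      have hnil : tl.filter (fun dl => decide (dl.1 = k)) = [] := by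
        rw [List.filter_eq_nil_iff]
        intro a ha hc
        simp only [decide_eq_true_eq] at hc
        exact h.1 (hc ▸ List.mem_map_of_mem ha)
      simp [List.lookup, hnil]
    · have hb2 : (x == k) = false := by simpa using Ne.symm he
      simp [List.lookup, he, hb2, ih h.2]

theorem pvContains_lookup (l2 : List (String × List String)) (d : String) :
    ((l2.map Prod.fst).contains d) = (l2.lookup d).isSome := by
  induction l2 with
  | nil => rfl
  | cons hd tl ih =>
    obtain ⟨k, v⟩ := hd
    by_cases he : d = k
    · subst he; simp [List.lookup]
    · have hb : (d == k) = false := by simpa using he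
      simp only [List.map_cons, List.contains_cons, hb, Bool.false_or, List.lookup, ih]

theorem pvInner_fact (l2 : List (String × List String)) (d : String)
    (h : (l2.map Prod.fst).Nodup) :
    ((l2.map Prod.fst).contains d = true →
        l2.filter (fun dl => decide (dl.1 = d)) = [(d, (l2.lookup d).getD [])])
    ∧ ((l2.map Prod.fst).contains d = false →
        l2.filter (fun dl => decide (dl.1 = d)) = []) := by
  rw [pvFilter_lookup l2 d h, pvContains_lookup]
  cases hl : l2.lookup d <;> simp

theorem pvTracks_eq (lb : List (String × List (String × List String)))
    (hpre : ∀ tr ∈ lb, (tr.2.map Prod.fst).Nodup) (d : String) :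
    lb.flatMap (fun tr => (tr.2.filter (fun dl => decide (dl.1 = d))).map (fun _ => tr.1)) =
    (lb.filter (fun tr => (tr.2.map Prod.fst).contains d)).map Prod.fst := by
  induction lb with
  | nil => rfl
  | cons hd tl ih =>
    have hh := pvInner_fact hd.2 d (hpre hd (List.mem_cons_self))
    have ih' := ih (fun tr htr => hpre tr (List.mem_cons_of_mem hd htr))
    by_cases hc : (hd.2.map Prod.fst).contains d = true
    · simp only [List.flatMap_cons, List.filter_cons, hh.1 hc, hc, if_true,
        List.map_cons, List.map_nil, ih', List.singleton_append]
    · have hc' : (hd.2.map Prod.fst).contains d = false := by simpa using hc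
      simp only [List.flatMap_cons, List.filter_cons, hh.2 hc', hc', Bool.false_eq_true,
        if_false, List.map_nil, List.nil_append, ih']

theorem pvLogics_eq (lb : List (String × List (String × List String)))
    (hpre : ∀ tr ∈ lb, (tr.2.map Prod.fst).Nodup) (d : String) :
    lb.flatMap (fun tr => (tr.2.filter (fun dl => decide (dl.1 = d))).flatMap Prod.snd) =
    (lb.filter (fun tr => (tr.2.map Prod.fst).contains d)).flatMap
      (fun tr => (tr.2.lookup d).getD []) := by
  induction lb with
  | nil => rfl
  | cons hd tl ih =>
    have hh := pvInner_fact hd.2 d (hpre hd (List.mem_cons_self))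
    have ih' := ih (fun tr htr => hpre tr (List.mem_cons_of_mem hd htr))
    by_cases hc : (hd.2.map Prod.fst).contains d = true
    · simp only [List.flatMap_cons, List.filter_cons, hh.1 hc, hc, if_true,
        List.flatMap_nil, List.append_nil, ih']
    · have hc' : (hd.2.map Prod.fst).contains d = false := by simpa using hc
      simp only [List.flatMap_cons, List.filter_cons, hh.2 hc', hc', Bool.false_eq_true,
        if_false, List.flatMap_nil, List.nil_append, ih']

theorem pvScanB_spec (d : String) (l : List (String × List (String × List String)))
    (acc : List String × PySem.Set String) :
    l.foldl (pvScanB d) acc =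
      (acc.1 ++ (l.filter (fun tr => (tr.2.map Prod.fst).contains d)).map Prod.fst,
       PySem.Set.update acc.2
         ((l.filter (fun tr => (tr.2.map Prod.fst).contains d)).flatMap
           (fun tr => (tr.2.lookup d).getD []))) := by
  induction l generalizing acc with
  | nil => simp [PySem.Set.update]
  | cons hd tl ih =>
    rw [List.foldl_cons, List.filter_cons]
    by_cases hc : (hd.2.map Prod.fst).contains d = true
    · rw [if_pos hc,
        show pvScanB d acc hd = (acc.1 ++ [hd.1], PySem.Set.update acc.2 ((hd.2.lookup d).getD []))
          from by unfold pvScanB; rw [if_pos hc], ih]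
      simp [PySem.Set.update_append, List.append_assoc]
    · rw [if_neg hc, show pvScanB d acc hd = acc from by unfold pvScanB; rw [if_neg hc], ih]

-- ===== VERDICT (by name: the statement is the Claim_ definition above) =====
theorem get_new_division_str_spec : Claim_equal_get_new_division_str := by
  intro lb _hdom hpre
  unfold Spec_get_new_division_str get_new_division_str get_new_division_str_alt
  obtain ⟨k1, k2, k3, k4⟩ := pvOuterA_spec lb (PySem.Dict.empty, PySem.Dict.empty)
    (fun x => by simp [PySem.Dict.contains_empty])
  simp only [k2, PySem.Dict.keys_empty, PySem.Set.update_nil_left]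
  congr 1
  apply List.map_congr_left
  intro d _
  rw [k3 d, k4 d, pvScanB_spec]
  simp only [PySem.Dict.getD_empty, List.nil_append, PySem.Set.empty,
    PySem.Set.update_nil_left, pvTracks_eq lb hpre.2 d, pvLogics_eq lb hpre.2 d]
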